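-- pv_equiv track=rewrite | github.com/Huijiny/TIL | algorithm/IM_대비/1289_원재의메모리복구/sol.py | solution
-- ===== SOURCE A (Python) =====
-- def solution(original):
--     count = 0
--     if original[0:1][0] == '1':
--         count = 1
--     for i in range(1, len(original)):
--         if original[i-1] != original[i]:
--             count += 1
--
--     return count
-- ===== SOURCE B (Python) =====
-- def solution(original):
--     # Build the list of run heads (one char per maximal run) by skipping
--     # over each run, then count the runs; a leading run of the unset bit
--     # costs nothing, every other run boundary costs one change.
--     heads = []
--     i, n = 0, len(original)
--     while i < n:
--         c = original[i]
--         heads.append(c)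
--         while i < n and original[i] == c:
--             i += 1
--     count = len(heads)
--     if heads[0] != '1':
--         count -= 1
--     return count
-- ===== Notes on version B (the rewrite author's own statement) =====
-- stated objective: alternative
-- what changed: B builds the list of run heads by skipping over each maximal run with a nested scan and derives the answer as the number of runs minus a correction when the leading run is not a run of set bits, instead of A's single pass over adjacent index pairs counting transitions with a special-cased first character.
import Mathlib
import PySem

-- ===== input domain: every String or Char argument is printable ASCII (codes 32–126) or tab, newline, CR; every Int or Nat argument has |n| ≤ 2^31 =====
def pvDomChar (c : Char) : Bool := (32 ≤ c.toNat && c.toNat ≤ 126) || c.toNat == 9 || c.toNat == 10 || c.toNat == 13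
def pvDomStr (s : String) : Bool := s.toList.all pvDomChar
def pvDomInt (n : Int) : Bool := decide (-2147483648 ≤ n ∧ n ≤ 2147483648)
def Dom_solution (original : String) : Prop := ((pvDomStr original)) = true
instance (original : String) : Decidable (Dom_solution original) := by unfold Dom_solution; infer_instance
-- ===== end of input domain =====

-- B counts maximal runs (building the run-head list by skipping each run) and corrects
-- for a non-'1' leading run, instead of A's adjacent-transition scan; same cost, different shape.

-- ===== PORT A =====
-- A: count = 1 iff original[0:1][0] == '1', then for i in range(1, len): count += (s[i-1] != s[i]).
def solution (original : String) : Int :=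
  (PySem.List.pyRange 1 original.toList.length 1).foldl
    (fun count i =>
      if PySem.List.pyGetD original.toList (i - 1) ' ' ≠ PySem.List.pyGetD original.toList i ' '
      then count + 1 else count)
    (match PySem.List.pyGet? (PySem.List.slice original.toList (some 0) (some 1)) 0 with
     | some c => if c = '1' then 1 else 0
     | none => 0)   -- unreachable under Pre_solution (empty string: Python raises IndexError)

-- ===== PORT B =====
-- the inner while loop of Source B: record the head of the run, skip over the run, continue
def runHeads : List Char → List Char
  | [] => []
  | c :: rest => c :: runHeads (rest.dropWhile (fun x => x == c))
termination_by cs => cs.length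
decreasing_by
  simpa using Nat.lt_succ_of_le (List.length_dropWhile_le _ _)

def solution_alt (original : String) : Int :=
  match PySem.List.pyGet? (runHeads original.toList) 0 with
  | some c =>
      if c ≠ '1' then ((runHeads original.toList).length : Int) - 1
      else ((runHeads original.toList).length : Int)
  | none => 0   -- unreachable under Pre_solution (empty string: Python raises IndexError)

-- ===== PRECONDITION & SPEC =====
-- Pre_ excludes only the empty string, on which both A (original[0:1][0]) and B (heads[0]) raise IndexError.
def Pre_solution (original : String) : Prop := original ≠ ""
instance (original : String) : Decidable (Pre_solution original) := by unfold Pre_solution; infer_instance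
def pvWitness_solution : String := "0011101"

def Spec_solution (original : String) (out : Int) : Prop := out = solution_alt original
instance (original : String) (out : Int) : Decidable (Spec_solution original out) := by unfold Spec_solution; infer_instance

-- ===== CLAIM (what is proved, stated in full; the proofs are below) =====
def Claim_equal_solution : Prop := ∀ (original : String), Dom_solution original → Pre_solution original → Spec_solution original (solution original)

-- ===== LEMMAS AND PROOFS =====

-- number of adjacent transitions
def T : List Char → Int
  | [] => 0
  | [_] => 0
  | a :: b :: r => (if a ≠ b then 1 else 0) + T (b :: r)

theorem T_cons_dropWhile (c : Char) (rest : List Char) :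
    T (c :: rest) = T (c :: rest.dropWhile (fun x => x == c)) := by
  induction rest with
  | nil => rfl
  | cons d r ih =>
    by_cases h : d = c
    · subst h
      have h1 : T (d :: d :: r) = T (d :: r) := by simp [T]
      rw [h1, ih, List.dropWhile_cons_of_pos (by simp)]
    · rw [List.dropWhile_cons_of_neg (by simp [h])]

theorem runHeads_length (cs : List Char) (h : cs ≠ []) :
    ((runHeads cs).length : Int) = 1 + T cs := by
  induction cs using runHeads.induct with
  | case1 => simp at h
  | case2 c rest ih =>
    rw [runHeads, T_cons_dropWhile]
    rcases hd : rest.dropWhile (fun x => x == c) with _ | ⟨d, r⟩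
    · simp [runHeads, T]
    · have hdc : (d == c) = false := by
        have h' := List.head?_dropWhile_not (fun x => x == c) rest
        rw [hd] at h'
        simpa using h'
      have hne : c ≠ d := by simp at hdc; exact fun hh => hdc hh.symm
      have hih := ih (by simp [hd])
      rw [hd] at hih
      rw [show T (c :: d :: r) = (if c ≠ d then 1 else 0) + T (d :: r) from rfl, if_pos hne]
      simp only [List.length_cons]
      push_cast
      omega

theorem runHeads_head (c : Char) (rest : List Char) :
    PySem.List.pyGet? (runHeads (c :: rest)) 0 = some c := by
  rw [runHeads]; exact PySem.List.pyGet?_zero_cons c _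

theorem solution_alt_char (c : Char) (rest : List Char) (s : String)
    (hs : s.toList = c :: rest) :
    solution_alt s = (if c ≠ '1' then -1 else 0) + 1 + T (c :: rest) := by
  unfold solution_alt
  rw [hs, runHeads_head]
  have hlen := runHeads_length (c :: rest) (by simp)
  by_cases h : c = '1'
  · subst h; simp; omega
  · simp [h]
    omega

-- transitions when appending one element
theorem T_snoc (cs : List Char) (h : cs ≠ []) (y : Char) :
    T (cs ++ [y]) = T cs + (if cs.getLast? ≠ some y then 1 else 0) := by
  induction cs with
  | nil => simp at h
  | cons a r ih =>
    rcases r with _ | ⟨b, r'⟩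
    · have h1 : T ([a] ++ [y]) = (if a ≠ y then 1 else 0) + T [y] := rfl
      rw [h1]
      by_cases hay : a = y <;> simp [T, hay]
    · have hih := ih (by simp)
      simp only [List.cons_append] at hih ⊢
      rw [show T (a :: b :: (r' ++ [y])) = (if a ≠ b then 1 else 0) + T (b :: (r' ++ [y])) from rfl,
          hih,
          show T (a :: b :: r') = (if a ≠ b then 1 else 0) + T (b :: r') from rfl,
          List.getLast?_cons_cons]
      omega

-- the fold of A's loop over range(1, len cs) counts exactly the transitions of cs
theorem aloop_eq (cs : List Char) (count : Int) :
    (PySem.List.pyRange 1 cs.length 1).foldl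
      (fun count i =>
        if PySem.List.pyGetD cs (i - 1) ' ' ≠ PySem.List.pyGetD cs i ' ' then count + 1 else count)
      count = count + T cs := by
  induction cs using List.reverseRecOn generalizing count with
  | nil => rw [PySem.List.pyRange_one_eq_nil (by simp)]; simp [T]
  | append_singleton ys y ih =>
    rcases ys with _ | ⟨c, rest⟩
    · rw [PySem.List.pyRange_one_eq_nil (by simp)]; simp [T]
    · set xs := c :: rest with hxs
      have hne : xs ≠ [] := by simp [hxs]
      have hlen : (1 : Int) ≤ (xs.length : Int) := by simp [hxs]
      have hsplit : PySem.List.pyRange 1 (((xs ++ [y]).length : Nat) : Int) 1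
          = PySem.List.pyRange 1 (xs.length : Int) 1 ++ [(xs.length : Int)] := by
        have h1 : (((xs ++ [y]).length : Nat) : Int) = (xs.length : Int) + 1 := by
          simp
        rw [h1]
        exact PySem.List.pyRange_one_succ_right hlen
      rw [hsplit, List.foldl_append]
      have hcong : (PySem.List.pyRange 1 (xs.length : Int) 1).foldl
          (fun count i =>
            if PySem.List.pyGetD (xs ++ [y]) (i - 1) ' ' ≠ PySem.List.pyGetD (xs ++ [y]) i ' '
            then count + 1 else count) count
          = (PySem.List.pyRange 1 (xs.length : Int) 1).foldl
          (fun count i =>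
            if PySem.List.pyGetD xs (i - 1) ' ' ≠ PySem.List.pyGetD xs i ' '
            then count + 1 else count) count := by
        apply PySem.List.foldl_congr_mem
        intro acc i hi
        have hmem := (PySem.List.mem_pyRange_one.mp hi)
        have h1 : PySem.List.pyGetD (xs ++ [y]) (i - 1) ' ' = PySem.List.pyGetD xs (i - 1) ' ' := by
          rw [PySem.List.pyGetD_eq_getElem (xs ++ [y]) ' ' (by omega) (by simp; omega),
              PySem.List.pyGetD_eq_getElem xs ' ' (by omega) (by omega),
              List.getElem_append_left]
        have h2 : PySem.List.pyGetD (xs ++ [y]) i ' ' = PySem.List.pyGetD xs i ' ' := by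
          rw [PySem.List.pyGetD_eq_getElem (xs ++ [y]) ' ' (by omega) (by simp; omega),
              PySem.List.pyGetD_eq_getElem xs ' ' (by omega) (by omega),
              List.getElem_append_left]
        rw [h1, h2]
      rw [hcong, ih]
      have hlast : PySem.List.pyGetD (xs ++ [y]) ((xs.length : Int) - 1) ' ' = xs.getLast hne := by
        rw [PySem.List.pyGetD_eq_getElem (xs ++ [y]) ' ' (by omega) (by simp)]
        have ht : ((xs.length : Int) - 1).toNat = xs.length - 1 := by omega
        simp only [ht]
        rw [List.getElem_append_left (by omega)]
        exact (List.getLast_eq_getElem hne).symm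
      have hy : PySem.List.pyGetD (xs ++ [y]) ((xs.length : Int)) ' ' = y := by
        rw [PySem.List.pyGetD_eq_getElem (xs ++ [y]) ' ' (by omega) (by simp)]
        simp
      simp only [List.foldl_cons, List.foldl_nil, hlast, hy]
      rw [T_snoc xs hne y, List.getLast?_eq_some_getLast hne]
      by_cases h : xs.getLast hne = y <;> · simp [h]; try omega

theorem solution_char (c : Char) (rest : List Char) (s : String)
    (hs : s.toList = c :: rest) :
    solution s = (if c = '1' then 1 else 0) + T (c :: rest) := by
  unfold solution
  rw [hs]
  have hslice : PySem.List.slice (c :: rest) (some 0) (some 1) = [c] := by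
    rw [show ((0 : Int)) = ((0 : Nat) : Int) from rfl, show ((1 : Int)) = ((1 : Nat) : Int) from rfl,
        PySem.List.slice_natCast]
    simp
  rw [hslice, aloop_eq]
  rw [PySem.List.pyGet?_zero_cons c []]

-- ===== VERDICT (by name: the statement is the Claim_ definition above) =====
theorem solution_spec : Claim_equal_solution := by
  intro original _ hpre
  unfold Spec_solution
  rcases hcs : original.toList with _ | ⟨c, rest⟩
  · exact absurd (by simpa using hcs) hpre
  · rw [solution_char c rest original hcs, solution_alt_char c rest original hcs]
    by_cases h : c = '1' <;> simp [h]
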